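-- pv_equiv track=rewrite | github.com/dawidzygmunt/Excel-tool | main.py | znajdz_nr_Zamowienia
-- ===== SOURCE A (Python) =====
-- def znajdz_nr_Zamowienia(napis): #* Sprawdza czy w Tytule operacji występuje numer zamówienia i czy nie zawiera błędów w zasadzie zapisu
--     for i, c in enumerate(napis):
--         if napis[i] == 'P':     # Jeżeli w napisie znajdzie znak 'P'
--             x=i+1
--             try:
--                 while x<i+11:       #Sprawdza czy po znaku 'P' występuje 10 liczb
--                     if not napis[x].isnumeric():        #Jeżeli znak nie jest liczbą
--                         break
--                     elif x == i+10:      #Jeżeli po znaku 'P' wystąpiło 10 cyfr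
--                         dlugosc = len(napis)
--                         if len(napis) == x+1 or not napis[i+11].isnumeric():        #Jeżeli ciąg znaków przekracza 10 cyfr pod rząd (tzn jest 11-sta liczba, litery się nie liczą)
--                             print (napis[i:i+11])
--                             return 1
--                     x=x+1
--             except:
--                 return 0
--     return 0
-- ===== SOURCE B (Python) =====
-- def znajdz_nr_Zamowienia(napis):
--     # Single left-to-right pass: p = index of the active 'P' (or -1),
--     # cnt = number of consecutive numeric chars seen since it.
--     p = -1
--     cnt = 0
--     for j, c in enumerate(napis):
--         if p != -1 and c.isnumeric():
--             cnt += 1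
--             if cnt == 11:
--                 p = -1
--         else:
--             if p != -1 and cnt == 10:
--                 print(napis[p:p+11])
--                 return 1
--             p = j if c == 'P' else -1
--             cnt = 0
--     if p != -1 and cnt == 10:
--         print(napis[p:p+11])
--         return 1
--     return 0
-- ===== Notes on version B (the rewrite author's own statement) =====
-- stated objective: alternative
-- what changed: Replaced the nested scan (for every 'P' an inner 10-char look-ahead loop with try/except) by a single left-to-right pass maintaining a state machine (index of the active 'P' and a counter of consecutive digits), so each character is examined once.
import Mathlib
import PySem

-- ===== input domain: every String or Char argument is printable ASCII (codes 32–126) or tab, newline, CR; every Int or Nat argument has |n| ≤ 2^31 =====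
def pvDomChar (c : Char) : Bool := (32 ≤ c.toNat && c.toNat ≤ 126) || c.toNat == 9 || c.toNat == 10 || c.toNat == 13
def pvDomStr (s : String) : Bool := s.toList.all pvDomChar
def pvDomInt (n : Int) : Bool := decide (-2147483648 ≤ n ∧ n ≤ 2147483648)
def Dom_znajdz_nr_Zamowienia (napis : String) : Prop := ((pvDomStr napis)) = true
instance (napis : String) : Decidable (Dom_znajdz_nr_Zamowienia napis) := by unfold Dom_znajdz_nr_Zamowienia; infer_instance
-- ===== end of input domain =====

-- B replaces A's nested scan (inner 10-char look-ahead per 'P', try/except) by a single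
-- left-to-right pass with a small state machine; equivalence is about the RETURN value only
-- (both programs also print the matched 11-char slice before returning 1).
-- 'isnumeric' is ported as PySem.Chars.isdigit, exact on the printable-ASCII domain Dom_.
-- Loops are transliterated as structural recursion on a fuel that counts the remaining
-- iterations exactly (the loop guards are kept in the bodies).

-- ===== PORT A =====
-- c.isnumeric() — on the ASCII domain identical to isdigit
def pvDigit (c : Char) : Bool := PySem.Chars.isdigit c

-- inner 'while x < i+11' loop of A; some 1 = 'return 1', some 0 = IndexError caught
-- by 'except: return 0', none = loop left without returning (break / exhausted);
-- fuel = i + 11 - x = remaining iterations (fuel = 0 exactly when the guard fails)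
def pvInnerAGo (cs : List Char) (i : Nat) : Nat → Nat → Option Int
  | 0, _ => none
  | fuel + 1, x =>
    match PySem.List.pyGet? cs (x : Int) with
    | none => some 0                                   -- IndexError → except → return 0
    | some ch =>
      if ¬ pvDigit ch then none                        -- break
      else if x = i + 10 then
        if cs.length = x + 1 then some 1
        else
          match PySem.List.pyGet? cs ((i : Int) + 11) with
          | none => some 0                             -- IndexError → except → return 0
          | some c2 => if ¬ pvDigit c2 then some 1 else pvInnerAGo cs i fuel (x + 1)
      else pvInnerAGo cs i fuel (x + 1)

def pvInnerA (cs : List Char) (i x : Nat) : Option Int := pvInnerAGo cs i (i + 11 - x) x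

-- outer 'for i, c in enumerate(napis)' loop of A; fuel = cs.length - i
def pvOuterAGo (cs : List Char) : Nat → Nat → Int
  | 0, _ => 0
  | fuel + 1, i =>
    if h : i < cs.length then
      if cs[i] = 'P' then
        match pvInnerA cs i (i + 1) with
        | some r => r
        | none => pvOuterAGo cs fuel (i + 1)
      else pvOuterAGo cs fuel (i + 1)
    else 0

def znajdz_nr_Zamowienia (napis : String) : Int :=
  pvOuterAGo napis.toList napis.toList.length 0

-- ===== PORT B =====
-- the single pass of Source B: p = index of the active 'P' (-1 if none), cnt = consecutive
-- digits since it; fuel = cs.length - j = remaining characters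
def pvLoopBGo (cs : List Char) : Nat → Nat → Int → Nat → Int
  | 0, _, p, cnt => if p ≠ -1 ∧ cnt = 10 then 1 else 0
  | fuel + 1, j, p, cnt =>
    if h : j < cs.length then
      let c := cs[j]
      if p ≠ -1 ∧ pvDigit c = true then
        if cnt + 1 = 11 then pvLoopBGo cs fuel (j + 1) (-1) (cnt + 1)
        else pvLoopBGo cs fuel (j + 1) p (cnt + 1)
      else
        if p ≠ -1 ∧ cnt = 10 then 1
        else pvLoopBGo cs fuel (j + 1) (if c = 'P' then (j : Int) else -1) 0
    else
      if p ≠ -1 ∧ cnt = 10 then 1 else 0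

def znajdz_nr_Zamowienia_alt (napis : String) : Int :=
  pvLoopBGo napis.toList napis.toList.length 0 (-1) 0

-- ===== PRECONDITION & SPEC =====
def Spec_znajdz_nr_Zamowienia (napis : String) (out : Int) : Prop := out = znajdz_nr_Zamowienia_alt napis
instance (napis : String) (out : Int) : Decidable (Spec_znajdz_nr_Zamowienia napis out) := by unfold Spec_znajdz_nr_Zamowienia; infer_instance

-- ===== CLAIM (what is proved, stated in full; the proofs are below) =====
def Claim_equal_znajdz_nr_Zamowienia : Prop := ∀ (napis : String), Dom_znajdz_nr_Zamowienia napis → Spec_znajdz_nr_Zamowienia napis (znajdz_nr_Zamowienia napis)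

-- ===== LEMMAS AND PROOFS =====

-- reference predicate: a valid order number starts at k ('P', then exactly 10 digits)
def pvOk (cs : List Char) (k : Nat) : Bool :=
  decide (cs.getD k ' ' = 'P')
    && (List.range 10).all (fun t => pvDigit (cs.getD (k + 1 + t) ' '))
    && !pvDigit (cs.getD (k + 11) ' ')

-- some valid order number starts at an index ≥ j (fuel = cs.length - j)
def pvHasGo (cs : List Char) : Nat → Nat → Bool
  | 0, _ => false
  | fuel + 1, j => pvOk cs j || pvHasGo cs fuel (j + 1)

def pvHas (cs : List Char) (j : Nat) : Bool := pvHasGo cs (cs.length - j) j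

theorem pvDigit_space : pvDigit ' ' = false := by decide

theorem getD_P_lt (cs : List Char) (k : Nat) (h : cs.getD k ' ' = 'P') : k < cs.length := by
  by_contra hk
  rw [List.getD_eq_default _ _ (by omega)] at h
  exact absurd h (by decide)

theorem ok_of (cs : List Char) (k : Nat) (hP : cs.getD k ' ' = 'P')
    (hd : ∀ t, t < 10 → pvDigit (cs.getD (k + 1 + t) ' ') = true)
    (h11 : pvDigit (cs.getD (k + 11) ' ') = false) : pvOk cs k = true := by
  unfold pvOk
  rw [decide_eq_true hP, h11,
    (List.all_eq_true).mpr (fun t ht => hd t (List.mem_range.mp ht))]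
  rfl

theorem ok_false_notP (cs : List Char) (k : Nat) (hP : cs.getD k ' ' ≠ 'P') :
    pvOk cs k = false := by
  unfold pvOk
  rw [decide_eq_false hP, Bool.false_and, Bool.false_and]

theorem ok_false_break (cs : List Char) (k t₀ : Nat) (ht : t₀ < 10)
    (h : pvDigit (cs.getD (k + 1 + t₀) ' ') = false) : pvOk cs k = false := by
  unfold pvOk
  rw [List.all_eq_false.mpr ⟨t₀, List.mem_range.mpr ht,
      by simp only [h, Bool.false_eq_true, not_false_eq_true]⟩,
    Bool.and_false, Bool.false_and]

theorem ok_false_11 (cs : List Char) (k : Nat)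
    (h : pvDigit (cs.getD (k + 11) ' ') = true) : pvOk cs k = false := by
  unfold pvOk
  rw [h]
  simp

theorem ok_len (cs : List Char) (k : Nat) (h : pvOk cs k = true) : k + 10 < cs.length := by
  by_contra hk
  rw [ok_false_break cs k 9 (by omega)
    (by rw [List.getD_eq_default _ _ (by omega)]; exact pvDigit_space)] at h
  exact absurd h (by simp)

theorem getD_ne_P_of_digit (cs : List Char) (k : Nat)
    (h : pvDigit (cs.getD k ' ') = true) : cs.getD k ' ' ≠ 'P' := by
  intro hP; rw [hP] at h; exact absurd h (by decide)

theorem has_ge (cs : List Char) (j : Nat) (h : cs.length ≤ j) : pvHas cs j = false := by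
  unfold pvHas
  rw [Nat.sub_eq_zero_of_le h]
  rfl

theorem has_lt (cs : List Char) (j : Nat) (h : j < cs.length) :
    pvHas cs j = (pvOk cs j || pvHas cs (j + 1)) := by
  unfold pvHas
  rw [show cs.length - j = (cs.length - (j + 1)) + 1 by omega]
  rfl

theorem has_false (cs : List Char) (j : Nat)
    (h : ∀ k, j ≤ k → pvOk cs k = false) : pvHas cs j = false := by
  by_cases hj : j < cs.length
  · rw [has_lt cs j hj, h j le_rfl,
      has_false cs (j + 1) (fun k hk => h k (by omega))]
    rfl
  · exact has_ge cs j (by omega)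
termination_by cs.length - j

theorem has_short (cs : List Char) (i : Nat) (h : cs.length ≤ i + 10) : pvHas cs i = false := by
  apply has_false
  intro k hk
  by_contra ho
  have := ok_len cs k (by simpa using ho)
  omega

theorem has_skip (cs : List Char) : ∀ (n a b : Nat), a + n = b →
    (∀ k, a ≤ k → k < b → pvOk cs k = false) → pvHas cs a = pvHas cs b := by
  intro n
  induction n with
  | zero => intro a b hab _; rw [show a = b by omega]
  | succ n ih =>
    intro a b hab h
    by_cases ha : a < cs.length
    · rw [has_lt cs a ha, h a le_rfl (by omega),
        ih (a + 1) b (by omega) (fun k hk hk' => h k (by omega) hk')]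
      rfl
    · rw [has_ge cs a (by omega), has_ge cs b (by omega)]

-- characterisation of A's inner loop
theorem innerA_char (cs : List Char) (i : Nat) : ∀ fuel x, fuel = i + 11 - x →
    i + 1 ≤ x → x < i + 11 →
    (∀ t, i + 1 ≤ t → t < x → pvDigit (cs.getD t ' ') = true) →
    cs.getD i ' ' = 'P' →
    (pvInnerAGo cs i fuel x = some 1 ∧ pvOk cs i = true)
    ∨ (pvInnerAGo cs i fuel x = some 0 ∧ cs.length ≤ i + 10)
    ∨ (pvInnerAGo cs i fuel x = none ∧ pvOk cs i = false) := by
  intro fuel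
  induction fuel with
  | zero => intro x hf _ hx2 _ _; omega
  | succ fuel ih =>
    intro x hf hx1 hx2 hd hP
    show _ ∨ _ ∨ _
    unfold pvInnerAGo
    rcases hget : PySem.List.pyGet? cs (x : Int) with _ | ch
    · -- IndexError
      right; left
      refine ⟨rfl, ?_⟩
      rw [PySem.List.pyGet?_natCast] at hget
      have := List.getElem?_eq_none_iff.mp hget
      omega
    · rw [PySem.List.pyGet?_natCast] at hget
      have hxlen : x < cs.length := (List.getElem?_eq_some_iff.mp hget).1
      have hch : cs.getD x ' ' = ch := by
        rw [List.getD_eq_getElem _ _ hxlen]; exact (List.getElem?_eq_some_iff.mp hget).2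
      by_cases hdg : pvDigit ch = true
      · simp only [hdg, not_true_eq_false, if_false]
        by_cases hx10 : x = i + 10
        · subst hx10
          have hdall : ∀ t, t < 10 → pvDigit (cs.getD (i + 1 + t) ' ') = true := by
            intro t ht
            rcases Nat.lt_or_ge (i + 1 + t) (i + 10) with h | h
            · exact hd _ (by omega) (by omega)
            · have : i + 1 + t = i + 10 := by omega
              rw [this, hch]; exact hdg
          by_cases hlen : cs.length = i + 10 + 1
          · simp only [if_pos rfl, if_pos hlen]
            left
            refine ⟨rfl, ok_of cs i hP hdall ?_⟩
            rw [List.getD_eq_default _ _ (by omega)]; exact pvDigit_space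
          · simp only [if_pos rfl, if_neg hlen]
            have hcast : ((i : Int) + 11) = ((i + 11 : Nat) : Int) := by push_cast; ring
            rcases hget2 : PySem.List.pyGet? cs ((i : Int) + 11) with _ | c2
            · -- unreachable: length > i+11 here
              rw [hcast, PySem.List.pyGet?_natCast] at hget2
              have := List.getElem?_eq_none_iff.mp hget2
              omega
            · rw [hcast, PySem.List.pyGet?_natCast] at hget2
              have h11len := (List.getElem?_eq_some_iff.mp hget2).1
              have hc2 : cs.getD (i + 11) ' ' = c2 := by
                rw [List.getD_eq_getElem _ _ h11len]; exact (List.getElem?_eq_some_iff.mp hget2).2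
              by_cases hdg2 : pvDigit c2 = true
              · simp only [hdg2, not_true_eq_false, if_false]
                right; right
                have hfz : fuel = 0 := by omega
                subst hfz
                exact ⟨rfl, ok_false_11 cs i (by rw [hc2]; exact hdg2)⟩
              · simp only [hdg2, if_true]
                left
                exact ⟨rfl, ok_of cs i hP hdall (by rw [hc2]; simpa using hdg2)⟩
        · simp only [if_neg hx10]
          exact ih (x + 1) (by omega) (by omega) (by omega)
            (fun t ht ht' => by
              rcases Nat.lt_or_ge t x with h | h
              · exact hd t ht h
              · have : t = x := by omega
                rw [this, hch]; exact hdg) hP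
      · simp only [hdg, if_true]
        right; right
        refine ⟨rfl, ok_false_break cs i (x - (i + 1)) (by omega) ?_⟩
        have : i + 1 + (x - (i + 1)) = x := by omega
        rw [this, hch]; simpa using hdg

-- characterisation of A's outer loop
theorem outerA_char (cs : List Char) : ∀ fuel i, fuel = cs.length - i →
    pvOuterAGo cs fuel i = if pvHas cs i then 1 else 0 := by
  intro fuel
  induction fuel with
  | zero =>
    intro i hf
    rw [has_ge cs i (by omega)]
    rfl
  | succ fuel ih =>
    intro i hf
    have hi : i < cs.length := by omega
    show (if h : i < cs.length then _ else _) = _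
    rw [dif_pos hi]
    by_cases hP : cs[i] = 'P'
    · have hPD : cs.getD i ' ' = 'P' := by rw [List.getD_eq_getElem _ _ hi]; exact hP
      simp only [if_pos hP]
      rcases innerA_char cs i (i + 11 - (i + 1)) (i + 1) rfl le_rfl (by omega) (by omega) hPD
        with ⟨he, ho⟩ | ⟨he, hl⟩ | ⟨he, ho⟩
      all_goals rw [show pvInnerA cs i (i + 1) = pvInnerAGo cs i (i + 11 - (i + 1)) (i + 1) from rfl] at *
      · rw [he, has_lt cs i hi, ho]; simp
      · rw [he, has_short cs i hl]; simp
      · rw [he, ih (i + 1) (by omega), has_lt cs i hi, ho]; simp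
    · have hPD : cs.getD i ' ' ≠ 'P' := by rw [List.getD_eq_getElem _ _ hi]; exact hP
      rw [if_neg hP, ih (i + 1) (by omega), has_lt cs i hi, ok_false_notP cs i hPD]
      simp

-- characterisation of B's single pass (both states at once)
theorem loopB_char (cs : List Char) : ∀ fuel j (p : Int) (cnt : Nat), fuel = cs.length - j →
    (p = -1 → pvLoopBGo cs fuel j p cnt = if pvHas cs j then 1 else 0)
    ∧ (∀ p₀ : Nat, p = (p₀ : Int) → p₀ + cnt + 1 = j → cnt ≤ 10 →
        cs.getD p₀ ' ' = 'P' →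
        (∀ t, p₀ < t → t < j → pvDigit (cs.getD t ' ') = true) →
        pvLoopBGo cs fuel j p cnt = if pvHas cs p₀ then 1 else 0) := by
  intro fuel
  induction fuel with
  | zero =>
    intro j p cnt hf
    have hj : cs.length ≤ j := by omega
    constructor
    · rintro rfl
      show (if (-1 : Int) ≠ -1 ∧ cnt = 10 then (1 : Int) else 0) = _
      rw [if_neg (by simp), has_ge cs j hj]
      rfl
    · rintro p₀ rfl hjcnt hcnt hP hd
      have hp₀len := getD_P_lt cs p₀ hP
      have hpne : ((p₀ : Int)) ≠ -1 := by omega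
      show (if (p₀ : Int) ≠ -1 ∧ cnt = 10 then (1 : Int) else 0) = _
      by_cases h10 : cnt = 10
      · rw [if_pos ⟨hpne, h10⟩]
        have hok : pvOk cs p₀ = true := by
          apply ok_of cs p₀ hP
          · intro t ht; exact hd _ (by omega) (by omega)
          · rw [List.getD_eq_default _ _ (by omega)]; exact pvDigit_space
        rw [has_lt cs p₀ hp₀len, hok]; simp
      · rw [if_neg (by intro h; exact h10 h.2)]
        have heq : pvHas cs p₀ = pvHas cs j := by
          apply has_skip cs (j - p₀) p₀ j (by omega)
          intro k hk hk'
          by_cases hk0 : k = p₀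
          · subst hk0
            apply ok_false_break cs k cnt (by omega)
            rw [List.getD_eq_default _ _ (by omega)]; exact pvDigit_space
          · exact ok_false_notP cs k (getD_ne_P_of_digit cs k (hd k (by omega) hk'))
        rw [heq, has_ge cs j hj]
        rfl
  | succ fuel ih =>
    intro j p cnt hf
    have hjlen : j < cs.length := by omega
    have hjD : cs.getD j ' ' = cs[j] := List.getD_eq_getElem _ _ hjlen
    constructor
    · rintro rfl
      show (if h : j < cs.length then _ else _) = _
      rw [dif_pos hjlen]
      have hne : ¬((-1 : Int) ≠ -1 ∧ pvDigit cs[j] = true) := by simp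
      rw [if_neg hne, if_neg (by simp)]
      by_cases hP : cs[j] = 'P'
      · rw [if_pos hP]
        exact (ih (j + 1) (j : Int) 0 (by omega)).2 j rfl (by omega) (by omega)
          (by rw [hjD]; exact hP) (fun t ht ht' => by omega)
      · rw [if_neg hP, (ih (j + 1) (-1) 0 (by omega)).1 rfl,
          has_lt cs j hjlen, ok_false_notP cs j (by rw [hjD]; exact hP)]
        simp
    · rintro p₀ rfl hjcnt hcnt hP hd
      have hp₀len := getD_P_lt cs p₀ hP
      have hpne : ((p₀ : Int)) ≠ -1 := by omega
      show (if h : j < cs.length then _ else _) = _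
      rw [dif_pos hjlen]
      by_cases hdg : pvDigit cs[j] = true
      · rw [if_pos ⟨hpne, hdg⟩]
        by_cases h11 : cnt + 1 = 11
        · rw [if_pos h11, (ih (j + 1) (-1) (cnt + 1) (by omega)).1 rfl]
          have heq : pvHas cs p₀ = pvHas cs (j + 1) := by
            apply has_skip cs (j + 1 - p₀) p₀ (j + 1) (by omega)
            intro k hk hk'
            by_cases hk0 : k = p₀
            · subst hk0
              have h11d : pvDigit (cs.getD (k + 11) ' ') = true := by
                rw [show k + 11 = j by omega, hjD]; exact hdg
              exact ok_false_11 cs k h11d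
            · have hkd : pvDigit (cs.getD k ' ') = true := by
                rcases Nat.lt_or_ge k j with h | h
                · exact hd k (by omega) h
                · rw [show k = j by omega, hjD]; exact hdg
              exact ok_false_notP cs k (getD_ne_P_of_digit cs k hkd)
          rw [heq]
        · rw [if_neg h11]
          exact (ih (j + 1) (p₀ : Int) (cnt + 1) (by omega)).2 p₀ rfl (by omega) (by omega) hP
            (fun t ht ht' => by
              rcases Nat.lt_or_ge t j with h | h
              · exact hd t ht h
              · rw [show t = j by omega, hjD]; exact hdg)
      · rw [if_neg (by intro h; exact hdg h.2)]
        by_cases h10 : cnt = 10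
        · rw [if_pos ⟨hpne, h10⟩]
          have hok : pvOk cs p₀ = true := by
            apply ok_of cs p₀ hP
            · intro t ht; exact hd _ (by omega) (by omega)
            · rw [show p₀ + 11 = j by omega, hjD]; simpa using hdg
          rw [has_lt cs p₀ hp₀len, hok]
          simp
        · rw [if_neg (by intro h; exact h10 h.2)]
          have hokp₀ : pvOk cs p₀ = false := by
            apply ok_false_break cs p₀ cnt (by omega)
            rw [show p₀ + 1 + cnt = j by omega, hjD]; simpa using hdg
          have hmid : ∀ k, p₀ < k → k < j → pvOk cs k = false := fun k hk hk' =>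
            ok_false_notP cs k (getD_ne_P_of_digit cs k (hd k hk hk'))
          by_cases hPj : cs[j] = 'P'
          · rw [if_pos hPj]
            rw [(ih (j + 1) (j : Int) 0 (by omega)).2 j rfl (by omega) (by omega)
              (by rw [hjD]; exact hPj) (fun t ht ht' => by omega)]
            have hsk : pvHas cs p₀ = pvHas cs j := by
              apply has_skip cs (j - p₀) p₀ j (by omega)
              intro k hk hk'
              by_cases hk0 : k = p₀
              · subst hk0; exact hokp₀
              · exact hmid k (by omega) hk'
            rw [hsk]
          · rw [if_neg hPj, (ih (j + 1) (-1) 0 (by omega)).1 rfl]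
            have hsk : pvHas cs p₀ = pvHas cs (j + 1) := by
              apply has_skip cs (j + 1 - p₀) p₀ (j + 1) (by omega)
              intro k hk hk'
              by_cases hk0 : k = p₀
              · subst hk0; exact hokp₀
              · rcases Nat.lt_or_ge k j with h' | h'
                · exact hmid k (by omega) h'
                · have hkj : k = j := by omega
                  subst hkj
                  exact ok_false_notP cs k (by rw [hjD]; exact hPj)
            rw [hsk]

-- ===== VERDICT (by name: the statement is the Claim_ definition above) =====
theorem znajdz_nr_Zamowienia_spec : Claim_equal_znajdz_nr_Zamowienia := by
  intro napis _
  unfold Spec_znajdz_nr_Zamowienia znajdz_nr_Zamowienia znajdz_nr_Zamowienia_alt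
  rw [outerA_char napis.toList napis.toList.length 0 (by omega),
    (loopB_char napis.toList napis.toList.length 0 (-1) 0 (by omega)).1 rfl]
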